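-- pv_equiv track=rewrite | github.com/HenryTrin/N-gram-Sentence-Generator | Chatterbot.py | bigramDictionary
-- ===== SOURCE A (Python) =====
-- def bigramDictionary(text):
--     bigramDict = {}
--     #Since we are looking at every 2 words. We need to minus the length by one otherwise a index error
--     length = len(text) -1
--
--
--     for i in range(length):
--             key = text[i]
--             value = text[i + 1]
--             # This is here to remove any empty space entry that might occur
--             if(value == ""):
--                 continue
--
--             #Needed a way to have new keys coming in
--             #Used: https://www.w3schools.com/python/ref_dictionary_setdefault.asp
--             bigramDict.setdefault(key, []).append(value)
--
--     return bigramDict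
-- ===== SOURCE B (Python) =====
-- def bigramDictionary(text):
--     # sort-free two-phase rewrite: build the flat pair list once, then group
--     # per distinct key (first-occurrence order) with a comprehension
--     pairs = [(a, b) for a, b in zip(text, text[1:]) if b != ""]
--     keys = list(dict.fromkeys(a for a, _ in pairs))
--     return {k: [b for a, b in pairs if a == k] for k in keys}
-- ===== Notes on version B (the rewrite author's own statement) =====
-- stated objective: alternative
-- what changed: A builds the dict incrementally with setdefault inside an index loop; B first materialises the filtered list of consecutive pairs via zip, dedups the keys in first-occurrence order with dict.fromkeys, and builds each value list by a per-key comprehension over the pair list.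
import Mathlib
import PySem

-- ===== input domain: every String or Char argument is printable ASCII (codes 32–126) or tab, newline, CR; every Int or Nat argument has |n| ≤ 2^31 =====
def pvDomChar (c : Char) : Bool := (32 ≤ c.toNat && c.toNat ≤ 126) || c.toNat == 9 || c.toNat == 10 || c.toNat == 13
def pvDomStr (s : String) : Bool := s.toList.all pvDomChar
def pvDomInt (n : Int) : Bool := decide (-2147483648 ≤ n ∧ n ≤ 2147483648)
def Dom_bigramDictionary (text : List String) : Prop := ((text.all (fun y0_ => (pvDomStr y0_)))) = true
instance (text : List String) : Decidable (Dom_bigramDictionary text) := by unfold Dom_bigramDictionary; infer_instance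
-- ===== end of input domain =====

-- B replaces A's incremental setdefault loop by a zip-built pair list, an ordered key dedup,
-- and a per-key comprehension (alternative decomposition; no speed claim).


-- ===== PORT A =====
-- literal port: bigramDict = {}; for i in range(len(text)-1): key = text[i]; value = text[i+1];
-- skip empty value, else setdefault(key, []).append(value)
-- (setdefault(k, []).append(v) is exactly Dict.modify k [] (· ++ [v]): keep position if present, append key otherwise)
def bigramDictionary (text : List String) : List (String × List String) :=
  let length : Int := (text.length : Int) - 1
  ((PySem.List.pyRange 0 length).foldl (fun bigramDict i =>
      let key := PySem.List.pyGetD text i ""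
      let value := PySem.List.pyGetD text (i + 1) ""
      if value == "" then bigramDict
      else bigramDict.modify key [] (fun vs => vs ++ [value]))
    PySem.Dict.empty).items

-- ===== PORT B =====
-- literal port of Source B: pairs via zip(text, text[1:]) filtered on b != "",
-- keys = dict.fromkeys order-preserving dedup (= PySem.List.dedup), then a per-key comprehension
def bigramDictionary_alt (text : List String) : List (String × List String) :=
  let pairs := (text.zip (text.drop 1)).filter (fun p => !(p.2 == ""))
  let keys := PySem.List.dedup (pairs.map Prod.fst)
  keys.map (fun k => (k, (pairs.filter (fun p => p.1 == k)).map Prod.snd))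

-- ===== PRECONDITION & SPEC =====
def Spec_bigramDictionary (text : List String) (out : List (String × List String)) : Prop := out = bigramDictionary_alt text
instance (text : List String) (out : List (String × List String)) : Decidable (Spec_bigramDictionary text out) := by unfold Spec_bigramDictionary; infer_instance

-- ===== CLAIM (what is proved, stated in full; the proofs are below) =====
def Claim_equal_bigramDictionary : Prop := ∀ (text : List String), Dom_bigramDictionary text → Spec_bigramDictionary text (bigramDictionary text)

-- ===== LEMMAS AND PROOFS =====

-- A's indexed loop reads exactly the consecutive pairs: the mapped index range IS zip(text, text[1:])
lemma pairs_of_range (text : List String) :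
    (PySem.List.pyRange 0 ((text.length : Int) - 1)).map
      (fun i => (PySem.List.pyGetD text i "", PySem.List.pyGetD text (i + 1) "")) =
    text.zip (text.drop 1) := by
  cases text with
  | nil => simp [PySem.List.pyRange]
  | cons x xs =>
    have hlen : ((x :: xs).length : Int) - 1 = ((xs.length : Nat) : Int) := by
      push_cast [List.length_cons]; ring
    rw [hlen, PySem.List.pyRange_zero_natCast, List.map_map]
    apply List.ext_getElem
    · simp
    · intro i h1 h2
      have hi : i < xs.length := by simpa using h1
      have hA : i < (x :: xs).length := by simp; omega
      have h3 : i + 1 < (x :: xs).length := by simp; omega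
      have hc : ((i : Int) + 1) = ((i + 1 : Nat) : Int) := by push_cast; ring
      simp only [Function.comp, List.getElem_map, List.getElem_range, hc,
        PySem.List.pyGetD_natCast, List.getElem_zip]
      rw [List.getD_eq_getElem _ _ hA, List.getD_eq_getElem _ _ h3]
      simp


-- ===== VERDICT (by name: the statement is the Claim_ definition above) =====
theorem bigramDictionary_spec : Claim_equal_bigramDictionary := by
  intro text _
  unfold Spec_bigramDictionary
  unfold bigramDictionary bigramDictionary_alt
  dsimp only []
  have h1 : (((PySem.List.pyRange 0 ((text.length : Int) - 1)).map
        (fun i => (PySem.List.pyGetD text i "", PySem.List.pyGetD text (i + 1) ""))).foldl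
        (fun d (p : String × String) =>
          if p.2 == "" then d else d.modify p.1 [] (fun vs => vs ++ [p.2]))
        (PySem.Dict.empty : PySem.Dict String (List String)))
      = ((PySem.List.pyRange 0 ((text.length : Int) - 1)).foldl
        (fun bigramDict i =>
          if PySem.List.pyGetD text (i + 1) "" == "" then bigramDict
          else bigramDict.modify (PySem.List.pyGetD text i "") []
            (fun vs => vs ++ [PySem.List.pyGetD text (i + 1) ""]))
        PySem.Dict.empty) := by
    rw [List.foldl_map]
  rw [← pairs_of_range text]
  rw [← h1]
  set pairs := ((PySem.List.pyRange 0 ((text.length : Int) - 1)).map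
      (fun i => (PySem.List.pyGetD text i "", PySem.List.pyGetD text (i + 1) ""))) with hp
  clear_value pairs
  have hfold :
      (pairs.foldl (fun d (p : String × String) =>
          if p.2 == "" then d else d.modify p.1 [] (fun vs => vs ++ [p.2]))
        (PySem.Dict.empty : PySem.Dict String (List String)))
      = ((pairs.filter (fun p => !(p.2 == ""))).foldl
          (fun d (p : String × String) => d.modify p.1 [] (fun vs => vs ++ [p.2]))
          PySem.Dict.empty) := by
    rw [List.foldl_filter]
    congr 1
    funext d q
    by_cases h : q.2 = "" <;> simp [h]
  rw [hfold]
  set fp := pairs.filter (fun p => !(p.2 == "")) with hfp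
  clear_value fp
  set D := fp.foldl (fun d (p : String × String) => d.modify p.1 [] (fun vs => vs ++ [p.2]))
      (PySem.Dict.empty : PySem.Dict String (List String)) with hD
  have hnodup : D.keys.Nodup := by
    rw [hD]
    exact PySem.Dict.nodup_keys_foldl_modify_key fp Prod.fst [] (fun d p => fun vs => vs ++ [p.2]) _ PySem.Dict.nodup_keys_empty
  have hkeys : D.keys = PySem.List.dedup (fp.map Prod.fst) := by
    rw [hD, PySem.Dict.keys_foldl_modify_key fp Prod.fst [] (fun d p => fun vs => vs ++ [p.2]), PySem.Dict.keys_empty,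
      PySem.Set.update_nil_left, PySem.List.dedup_eq_ofList]
  rw [PySem.Dict.items_eq_map_keys D hnodup [], hkeys]
  apply List.map_congr_left
  intro k _
  have hg := PySem.Dict.getD_foldl_modify_append fp
      (PySem.Dict.empty : PySem.Dict String (List String)) k
  rw [← hD] at hg
  rw [hg]
  simp [PySem.Dict.getD_empty]
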